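-- pv_equiv track=rewrite | github.com/darkcofy/sqlprism | src/sqlprism/core/conventions.py | _classify_segments
-- ===== SOURCE A (Python) =====
-- from collections import Counter
--
-- def _classify_segments(
--     stripped_tokens: list[list[str]],
--     expected_len: int,
-- ) -> list[str]:
--     """Classify variable segments by position into semantic labels.
--
--     Uses heuristics: known source system names → 'source',
--     short tokens → 'description', otherwise 'entity'.
--     """
--     if expected_len <= 0:
--         return ["description"]
--
--     # Collect tokens by position
--     by_position: list[Counter[str]] = [
--         Counter() for _ in range(expected_len)
--     ]
--     for tokens in stripped_tokens:
--         for i, tok in enumerate(tokens[:expected_len]):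
--             by_position[i][tok] += 1
--
--     labels = []
--     for i, counter in enumerate(by_position):
--         distinct = len(counter)
--         total = sum(counter.values())
--         if total == 0:
--             labels.append("description")
--             continue
--
--         # High cardinality relative to total → entity-like
--         # Low cardinality → source/category-like
--         ratio = distinct / total
--         if ratio < 0.3 and distinct <= 5:
--             labels.append("source")
--         elif i == expected_len - 1:
--             labels.append("entity")
--         else:
--             labels.append("domain" if i == 0 else "description")
--
--     return labels if labels else ["description"]
-- ===== SOURCE B (Python) =====
-- def _label_at(rows, i, n):
--     values = [toks[i] for toks in rows if i < len(toks)]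
--     total = len(values)
--     if total == 0:
--         return "description"
--     distinct = len(set(values))
--     if 10 * distinct < 3 * total and distinct <= 5:
--         return "source"
--     if i == n - 1:
--         return "entity"
--     return "domain" if i == 0 else "description"
--
--
-- def _classify_segments(
--     stripped_tokens: list[list[str]],
--     expected_len: int,
-- ) -> list[str]:
--     if expected_len <= 0:
--         return ["description"]
--     return [_label_at(stripped_tokens, i, expected_len)
--             for i in range(expected_len)]
-- ===== Notes on version B (the rewrite author's own statement) =====
-- stated objective: alternative
-- what changed: Replaces the row-major pass that mutates a list of per-position Counters with a column-major comprehension: for each position i it gathers that column once and labels it from len(values) and len(set(values)), with the float ratio test d/t < 0.3 replaced by the exact integer test 10*d < 3*t.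
import Mathlib
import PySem

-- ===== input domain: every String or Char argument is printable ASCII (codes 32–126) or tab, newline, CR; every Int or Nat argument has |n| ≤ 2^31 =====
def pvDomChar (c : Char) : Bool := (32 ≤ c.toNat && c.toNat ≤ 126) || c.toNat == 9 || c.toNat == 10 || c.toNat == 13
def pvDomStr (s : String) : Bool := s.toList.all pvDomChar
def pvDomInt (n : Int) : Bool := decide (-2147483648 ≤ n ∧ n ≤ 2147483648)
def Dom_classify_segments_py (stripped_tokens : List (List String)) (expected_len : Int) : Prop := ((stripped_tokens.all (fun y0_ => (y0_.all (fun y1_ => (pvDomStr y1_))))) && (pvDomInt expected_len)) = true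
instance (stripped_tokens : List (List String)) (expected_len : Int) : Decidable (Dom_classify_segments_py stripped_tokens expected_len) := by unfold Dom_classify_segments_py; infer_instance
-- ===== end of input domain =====

-- B relabels positions column-by-column (gather the column, count it and its distinct values)
-- instead of A's row-major pass mutating a list of per-position Counters; same return value.
-- Python's float test `distinct/total < 0.3` is ported on BOTH sides as the integer test
-- `10*distinct < 3*total`: these agree because 0 < distinct ≤ total here, IEEE division is
-- correctly rounded, the double of the literal 0.3 is below 3/10 by ≈1.1e-17, and whenever
-- 10*distinct ≠ 3*total the rational d/t differs from 3/10 by at least 1/(10*total), far more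
-- than one rounding ulp for any total representable in this domain.

-- ===== PORT A =====
-- `for i, tok in enumerate(tokens[:expected_len]): by_position[i][tok] += 1` — walk the
-- truncated row and the counter list in step (exact: i runs over positions of tokens[:n] and
-- len(by_position) = n ≥ len(tokens[:n]), so each step is exactly `by_position[i][tok] += 1`).
def pvBumpRow : List (PySem.Dict String Int) → List String → List (PySem.Dict String Int)
  | bps, [] => bps
  | [], _ => []
  | b :: bps, t :: ts => b.modify t 0 (· + 1) :: pvBumpRow bps ts

def classify_segments_py (stripped_tokens : List (List String)) (expected_len : Int) : List String :=
  if expected_len ≤ 0 then ["description"]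
  else
    let init : List (PySem.Dict String Int) :=
      (PySem.List.pyRange 0 expected_len 1).map (fun _ => PySem.Dict.empty)
    let byPos := stripped_tokens.foldl
      (fun bp toks => pvBumpRow bp (PySem.List.slice toks (some 0) (some expected_len))) init
    let labels := (PySem.List.enumerate byPos 0).foldl
      (fun labels p =>
        let distinct : Int := (p.2.size : Int)
        let total : Int := p.2.values.sum
        if total = 0 then labels ++ ["description"]
        else if 10 * distinct < 3 * total ∧ distinct ≤ 5 then labels ++ ["source"]
        else if p.1 = expected_len - 1 then labels ++ ["entity"]
        else labels ++ [if p.1 = 0 then "domain" else "description"])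
      ([] : List String)
    if labels.isEmpty then ["description"] else labels

-- ===== PORT B =====
-- `[toks[i] for toks in rows if i < len(toks)]`: pyGet? is `some` exactly when the guard holds
-- (i ≥ 0 here), so the guarded comprehension is this filterMap.
def pvLabelAt (rows : List (List String)) (i n : Int) : String :=
  let values := rows.filterMap (fun toks => PySem.List.pyGet? toks i)
  let total : Int := (values.length : Int)
  if total = 0 then "description"
  else
    let distinct : Int := ((PySem.Set.ofList values).length : Int)
    if 10 * distinct < 3 * total ∧ distinct ≤ 5 then "source"
    else if i = n - 1 then "entity"
    else if i = 0 then "domain"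
    else "description"

def classify_segments_py_alt (stripped_tokens : List (List String)) (expected_len : Int) : List String :=
  if expected_len ≤ 0 then ["description"]
  else (PySem.List.pyRange 0 expected_len 1).map
    (fun i => pvLabelAt stripped_tokens i expected_len)

-- ===== PRECONDITION & SPEC =====
def Spec_classify_segments_py (stripped_tokens : List (List String)) (expected_len : Int) (out : List String) : Prop := out = classify_segments_py_alt stripped_tokens expected_len
instance (stripped_tokens : List (List String)) (expected_len : Int) (out : List String) : Decidable (Spec_classify_segments_py stripped_tokens expected_len out) := by unfold Spec_classify_segments_py; infer_instance

-- ===== CLAIM (what is proved, stated in full; the proofs are below) =====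
def Claim_equal_classify_segments_py : Prop := ∀ (stripped_tokens : List (List String)) (expected_len : Int), Dom_classify_segments_py stripped_tokens expected_len → Spec_classify_segments_py stripped_tokens expected_len (classify_segments_py stripped_tokens expected_len)

-- ===== LEMMAS AND PROOFS =====

theorem pvBumpRow_getElem? (bps : List (PySem.Dict String Int)) (ts : List String) (j : Nat) :
    (pvBumpRow bps ts)[j]? =
      match ts[j]? with
      | some t => (bps[j]?).map (fun d => d.modify t 0 (· + 1))
      | none => bps[j]? := by
  induction bps generalizing ts j with
  | nil =>
    cases ts with
    | nil => cases j <;> simp [pvBumpRow]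
    | cons t ts =>
      cases j with
      | zero => simp [pvBumpRow]
      | succ j => simp [pvBumpRow]; cases ts[j]? <;> rfl
  | cons b bps ih =>
    cases ts with
    | nil => simp [pvBumpRow]
    | cons t ts =>
      cases j with
      | zero => simp [pvBumpRow]
      | succ j => simpa [pvBumpRow] using ih ts j

theorem pvFoldl_bump_getElem? (n : Int) (st : List (List String))
    (bps : List (PySem.Dict String Int)) (j : Nat) :
    (st.foldl (fun bp toks => pvBumpRow bp (PySem.List.slice toks (some 0) (some n))) bps)[j]? =
      (bps[j]?).map (fun d =>
        (st.filterMap (fun toks => (PySem.List.slice toks (some 0) (some n))[j]?)).foldl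
          (fun d t => d.modify t 0 (· + 1)) d) := by
  induction st generalizing bps with
  | nil => simp
  | cons toks st ih =>
    simp only [List.foldl_cons, List.filterMap_cons]
    rw [ih]
    rw [pvBumpRow_getElem? bps (PySem.List.slice toks (some 0) (some n)) j]
    cases h : (PySem.List.slice toks (some 0) (some n))[j]? with
    | none => rfl
    | some t => simp [Option.map_map]; rfl

theorem pvByPos_eq (st : List (List String)) (n : Int) (hn : 0 ≤ n) :
    st.foldl (fun bp toks => pvBumpRow bp (PySem.List.slice toks (some 0) (some n)))
      ((PySem.List.pyRange 0 n 1).map (fun _ => PySem.Dict.empty))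
    = (PySem.List.pyRange 0 n 1).map
        (fun i => PySem.Dict.counter (st.filterMap (fun toks => PySem.List.pyGet? toks i))) := by
  apply List.ext_getElem?
  intro j
  rw [pvFoldl_bump_getElem?]
  by_cases hj : j < n.toNat
  · have hsl : ∀ toks : List String,
        (PySem.List.slice toks (some 0) (some n))[j]? = toks[j]? := by
      intro toks
      rw [PySem.List.slice_zero_start, PySem.List.slice_to _ hn,
        List.getElem?_take_of_lt hj]
    have hrange : (PySem.List.pyRange 0 n 1)[j]? = some ((j : Int)) := by
      rw [PySem.List.pyRange_one]
      simp [hj]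
    simp only [List.getElem?_map, hrange, Option.map_some]
    congr 1
    rw [PySem.Dict.counter_eq_foldl]
    congr 1
    · apply List.filterMap_congr
      intro toks _
      rw [hsl toks, PySem.List.pyGet?_natCast]
  · have hrange : (PySem.List.pyRange 0 n 1)[j]? = none := by
      rw [PySem.List.pyRange_one]
      simp
      omega
    simp [hrange]
    omega

theorem pvCounter_values_sum (l : List String) :
    (PySem.Dict.counter l).values.sum = (l.length : Int) := by
  have h1 : (PySem.Dict.counter l).values
      = (PySem.Set.ofList l).map (fun k => ((List.count k l : Nat) : Int)) := by
    simp only [PySem.Dict.values, PySem.Dict.items_counter, List.map_map]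
    rfl
  rw [h1]
  have hperm : (PySem.Set.ofList l).Perm l.dedup := by
    refine (List.perm_ext_iff_of_nodup (PySem.Set.nodup_ofList l) l.nodup_dedup).mpr ?_
    intro x
    rw [PySem.Set.mem_ofList, List.mem_dedup]
  have h2 : ((PySem.Set.ofList l).map (fun k => ((List.count k l : Nat) : Int))).sum
      = ((l.dedup.map (fun k => ((List.count k l : Nat) : Int)))).sum :=
    (hperm.map _).sum_eq
  rw [h2]
  have h3 : (l.dedup.map (fun k => ((List.count k l : Nat) : Int)))
      = (l.dedup.map (fun k => List.count k l)).map (fun m : Nat => (m : Int)) := by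
    rw [List.map_map]; rfl
  rw [h3, ← Nat.cast_list_sum, List.sum_map_count_dedup_eq_length]

theorem pvCounter_size (l : List String) :
    (PySem.Dict.counter l).size = (PySem.Set.ofList l).length := by
  show (PySem.Dict.counter l).items.length = _
  rw [PySem.Dict.items_counter, List.length_map]

theorem pvLabels_foldl (n : Int) (xs : List (Int × PySem.Dict String Int)) (acc : List String) :
    xs.foldl
      (fun labels p =>
        let distinct : Int := (p.2.size : Int)
        let total : Int := p.2.values.sum
        if total = 0 then labels ++ ["description"]
        else if 10 * distinct < 3 * total ∧ distinct ≤ 5 then labels ++ ["source"]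
        else if p.1 = n - 1 then labels ++ ["entity"]
        else labels ++ [if p.1 = 0 then "domain" else "description"]) acc
    = acc ++ xs.map (fun p =>
        if p.2.values.sum = 0 then "description"
        else if 10 * (p.2.size : Int) < 3 * p.2.values.sum ∧ (p.2.size : Int) ≤ 5 then "source"
        else if p.1 = n - 1 then "entity"
        else if p.1 = 0 then "domain" else "description") := by
  induction xs generalizing acc with
  | nil => simp
  | cons p xs ih =>
    simp only [List.foldl_cons, List.map_cons, ih]
    split_ifs <;> simp

theorem pvEnum_map (n : Int) (hn : 0 ≤ n) (f : Int → PySem.Dict String Int) :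
    PySem.List.enumerate ((PySem.List.pyRange 0 n 1).map f) 0
      = (PySem.List.pyRange 0 n 1).map (fun i => (i, f i)) := by
  rw [PySem.List.enumerate_eq_map_pyRange _ PySem.Dict.empty]
  have hlen : (PySem.List.len ((PySem.List.pyRange 0 n 1).map f)) = n := by
    simp [PySem.List.len, PySem.List.length_pyRange_one]
    omega
  rw [hlen]
  apply List.map_congr_left
  intro i hi
  rw [PySem.List.mem_pyRange_one] at hi
  rw [PySem.List.pyGetD_map_pyRange_of_nonneg f n i PySem.Dict.empty hi.1 hi.2]

theorem pvPointwise (st : List (List String)) (n i : Int) :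
    (fun p : Int × PySem.Dict String Int =>
        if p.2.values.sum = 0 then "description"
        else if 10 * (p.2.size : Int) < 3 * p.2.values.sum ∧ (p.2.size : Int) ≤ 5 then "source"
        else if p.1 = n - 1 then "entity"
        else if p.1 = 0 then "domain" else "description")
      (i, PySem.Dict.counter (st.filterMap (fun toks => PySem.List.pyGet? toks i)))
    = pvLabelAt st i n := by
  unfold pvLabelAt
  simp only [pvCounter_values_sum, pvCounter_size]

-- ===== VERDICT (by name: the statement is the Claim_ definition above) =====
theorem classify_segments_py_spec : Claim_equal_classify_segments_py := by
  intro st n _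
  unfold Spec_classify_segments_py
  by_cases hn : n ≤ 0
  · simp [classify_segments_py, classify_segments_py_alt, hn]
  · have hn0 : 0 ≤ n := by omega
    simp only [classify_segments_py, classify_segments_py_alt, if_neg hn]
    rw [pvByPos_eq st n hn0, pvEnum_map n hn0, pvLabels_foldl, List.nil_append, List.map_map]
    have hne : (PySem.List.pyRange 0 n 1) ≠ [] := by
      rw [PySem.List.pyRange_one_cons (by omega : (0:Int) < n)]
      simp
    split
    · rename_i h
      rw [List.isEmpty_iff, List.map_eq_nil_iff] at h
      exact absurd h hne
    apply List.map_congr_left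
    intro i _
    exact pvPointwise st n i
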